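-- pv_equiv track=rewrite | github.com/camille-004/group-testing-rl | oracle.py | get_w_hat_t_helper
-- ===== SOURCE A (Python) =====
-- def to_binary(n, N):
--     """
--     Get binary representation of input n
--
--     :param n: Integer of which to get binary representation
--     :param N: Length of bitstring
--     :return: str
--     """
--     return bin(n).replace('0b', '').zfill(N)
--
-- def get_w_hat_t_helper(row_idx, col_idx, N):
--     """
--     Helper function to get entry (t, col_idx) of W-H matrix
--
--     :param row_idx: Row index of W-H matrix to find
--     :param col_idx: Column index of W-H matrix to find
--     :param N: Order of W-H matrix
--     :return: int
--     """
--     row_bin = to_binary(row_idx, N)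
--     col_bin = to_binary(col_idx, N)
--
--     row_list = [int(row_bit) for row_bit in list(row_bin[::-1])]
--     col_list = [int(col_bit) for col_bit in list(col_bin[::-1])]
--
--     result = 0
--     for row_bit, col_bit in zip(row_list, col_list):
--         result += row_bit * col_bit
--
-- # TODO Change back to -1 and 1
--     result = int((1 + ((-1) ** result)) / 2)
--     return (2 * result) - 1
-- ===== SOURCE B (Python) =====
-- def get_w_hat_t_helper(row_idx, col_idx, N):
--     """Walsh-Hadamard sign via the recursive tensor structure: peel the low
--     bits of the two indices and multiply the local signs."""
--     if row_idx < 0 or col_idx < 0: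
--         raise ValueError("indices must be non-negative")
--     if row_idx == 0 and col_idx == 0:
--         return 1
--     sign = -1 if (row_idx & 1) and (col_idx & 1) else 1
--     return sign * get_w_hat_t_helper(row_idx >> 1, col_idx >> 1, N - 1)
-- ===== Notes on version B (the rewrite author's own statement) =====
-- stated objective: faster
-- what changed: Replaced A's binary-string construction (bin/zfill/reverse/int-parse/zip loop plus a (-1)**parity formula) by a direct bit-peeling recursion on the two indices that multiplies local Kronecker-factor signs, never touching strings.
import Mathlib
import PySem

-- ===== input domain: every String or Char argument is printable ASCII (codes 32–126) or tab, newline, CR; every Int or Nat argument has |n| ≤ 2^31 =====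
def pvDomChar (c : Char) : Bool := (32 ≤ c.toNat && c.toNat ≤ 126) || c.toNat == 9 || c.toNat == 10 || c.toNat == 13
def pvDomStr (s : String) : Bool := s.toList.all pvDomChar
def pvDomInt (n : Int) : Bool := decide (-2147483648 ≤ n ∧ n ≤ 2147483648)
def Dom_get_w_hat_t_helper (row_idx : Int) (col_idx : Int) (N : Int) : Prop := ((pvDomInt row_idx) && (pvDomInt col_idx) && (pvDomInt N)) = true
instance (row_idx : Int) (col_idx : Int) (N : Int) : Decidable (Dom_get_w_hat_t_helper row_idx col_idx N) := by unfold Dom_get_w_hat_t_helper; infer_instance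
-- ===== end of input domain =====

-- B replaces A's binary-string build/reverse/parse/zip pipeline by a bit-peeling
-- recursion multiplying local Kronecker-factor signs (objective: faster, constant-factor).

-- ===== PORT A =====

-- Hand port of Python's bin(n).replace('0b',''), exact for n ≥ 0 (negatives are
-- outside Pre_: there Python A raises ValueError when int() meets the '-' sign).
def pvBinCore (n : Nat) : List Char :=
  if n = 0 then [] else pvBinCore (n / 2) ++ [if n % 2 = 1 then '1' else '0']

def pvBinStr (n : Nat) : List Char :=
  if n = 0 then ['0'] else pvBinCore n

-- Python's str.zfill(N): left-pad with '0' to width N (no-op if N ≤ length).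
def to_binary (n : Int) (N : Int) : List Char :=
  List.replicate (N - (pvBinStr n.toNat).length).toNat '0' ++ pvBinStr n.toNat

-- int(c) for a single binary digit character; exact on '0'/'1' (the only
-- characters to_binary produces for n ≥ 0).
def pvDigitInt (c : Char) : Int := (c.toNat : Int) - 48

-- 'result = 0; for row_bit, col_bit in zip(row_list, col_list): result += row_bit*col_bit'
-- (tail-recursive so it evaluates on long zfill-padded lists; zip stops at the shorter list)
def pvZipLoop : List Int → List Int → Int → Int
  | a :: as, b :: bs, acc => pvZipLoop as bs (acc + a * b)
  | _, _, acc => acc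

def get_w_hat_t_helper (row_idx : Int) (col_idx : Int) (N : Int) : Int :=
  let row_bin := to_binary row_idx N
  let col_bin := to_binary col_idx N
  let row_list := row_bin.reverse.map pvDigitInt
  let col_list := col_bin.reverse.map pvDigitInt
  let result := pvZipLoop row_list col_list 0
  -- int((1 + (-1)**result)/2): the float quotient is exactly 0.0 or 1.0 here,
  -- so integer division by 2 is exact; result ≥ 0 so the exponent is result.toNat
  let result2 := (1 + (-1 : Int) ^ result.toNat) / 2
  2 * result2 - 1

-- ===== PORT B =====

def pvAltRec (r : Nat) (c : Nat) (N : Int) : Int :=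
  if r = 0 ∧ c = 0 then 1
  else (if r % 2 = 1 ∧ c % 2 = 1 then (-1 : Int) else 1) * pvAltRec (r / 2) (c / 2) (N - 1)
termination_by r + c
decreasing_by omega

-- B raises ValueError on negative indices (outside Pre_); the port's guard value
-- there is arbitrary.
def get_w_hat_t_helper_alt (row_idx : Int) (col_idx : Int) (N : Int) : Int :=
  if row_idx < 0 ∨ col_idx < 0 then 1
  else pvAltRec row_idx.toNat col_idx.toNat N

-- ===== PRECONDITION & SPEC =====
-- Pre_ excludes exactly the inputs where Python A raises ValueError: a negative
-- index makes bin() emit a '-' that int() cannot parse (Python B raises there too).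
def Pre_get_w_hat_t_helper (row_idx : Int) (col_idx : Int) (N : Int) : Prop :=
  0 ≤ row_idx ∧ 0 ≤ col_idx
instance (row_idx : Int) (col_idx : Int) (N : Int) : Decidable (Pre_get_w_hat_t_helper row_idx col_idx N) := by unfold Pre_get_w_hat_t_helper; infer_instance

def pvWitness_get_w_hat_t_helper : Int × Int × Int := (6, 5, 3)

def Spec_get_w_hat_t_helper (row_idx : Int) (col_idx : Int) (N : Int) (out : Int) : Prop := out = get_w_hat_t_helper_alt row_idx col_idx N
instance (row_idx : Int) (col_idx : Int) (N : Int) (out : Int) : Decidable (Spec_get_w_hat_t_helper row_idx col_idx N out) := by unfold Spec_get_w_hat_t_helper; infer_instance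

-- ===== CLAIM (what is proved, stated in full; the proofs are below) =====
def Claim_equal_get_w_hat_t_helper : Prop := ∀ (row_idx : Int) (col_idx : Int) (N : Int), Dom_get_w_hat_t_helper row_idx col_idx N → Pre_get_w_hat_t_helper row_idx col_idx N → Spec_get_w_hat_t_helper row_idx col_idx N (get_w_hat_t_helper row_idx col_idx N)

-- ===== LEMMAS AND PROOFS =====

-- proof-only view of the zip loop
def pvZipSum : List Int → List Int → Int
  | a :: as, b :: bs => a * b + pvZipSum as bs
  | _, _ => 0

theorem pvZipLoop_eq_aux (xs : List Int) : ∀ ys : List Int, ∀ acc : Int,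
    pvZipLoop xs ys acc = acc + pvZipSum xs ys := by
  induction xs with
  | nil => intro ys acc; simp [pvZipLoop, pvZipSum]
  | cons a as ih =>
    intro ys acc
    cases ys with
    | nil => simp [pvZipLoop, pvZipSum]
    | cons b bs =>
      rw [show pvZipLoop (a :: as) (b :: bs) acc = pvZipLoop as bs (acc + a * b) from rfl,
        ih bs (acc + a * b), pvZipSum]
      ring

theorem pvZipLoop_eq (xs ys : List Int) :
    pvZipLoop xs ys 0 = pvZipSum xs ys := by
  rw [pvZipLoop_eq_aux]; ring

-- little-endian bit list of a natural number
def pvBitsLE (n : Nat) : List Int :=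
  if n = 0 then [] else (n % 2 : Nat) :: pvBitsLE (n / 2)

-- number of positions where both numbers have bit 1
def pvCnt (r c : Nat) : Nat :=
  if r = 0 ∧ c = 0 then 0
  else (if r % 2 = 1 ∧ c % 2 = 1 then 1 else 0) + pvCnt (r / 2) (c / 2)
termination_by r + c
decreasing_by omega

theorem pvBitsLE_zero : pvBitsLE 0 = [] := by rw [pvBitsLE]; simp

theorem pvBitsLE_pos (n : Nat) (h : n ≠ 0) :
    pvBitsLE n = ((n % 2 : Nat) : Int) :: pvBitsLE (n / 2) := by
  rw [pvBitsLE, if_neg h]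

theorem pvCnt_zero_left (c : Nat) : pvCnt 0 c = 0 := by
  induction c using Nat.strong_induction_on with
  | _ c ih =>
    rw [pvCnt]
    by_cases hc : c = 0
    · simp [hc]
    · rw [if_neg (by simp [hc])]
      rw [if_neg (by omega)]
      rw [show (0 : Nat) / 2 = 0 from rfl, ih (c / 2) (by omega)]

theorem pvCnt_zero_right (r : Nat) : pvCnt r 0 = 0 := by
  induction r using Nat.strong_induction_on with
  | _ r ih =>
    rw [pvCnt]
    by_cases hr : r = 0
    · simp [hr]
    · rw [if_neg (by simp [hr])]
      rw [if_neg (by omega)]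
      rw [show (0 : Nat) / 2 = 0 from rfl, ih (r / 2) (by omega)]

theorem pvBinCore_reverse (n : Nat) :
    (pvBinCore n).reverse.map pvDigitInt = pvBitsLE n := by
  induction n using Nat.strong_induction_on with
  | _ n ih =>
    rw [pvBinCore]
    by_cases h : n = 0
    · simp [h, pvBitsLE_zero]
    · rw [if_neg h, pvBitsLE_pos n h]
      simp only [List.reverse_append, List.map_append, List.reverse_cons,
        List.reverse_nil, List.nil_append, List.map_cons, List.map_nil]
      rw [ih (n / 2) (by omega)]
      have h2 : n % 2 = 0 ∨ n % 2 = 1 := by omega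
      rcases h2 with h2 | h2 <;> simp [h2, pvDigitInt]

theorem pvBinStr_reverse (n : Nat) :
    (pvBinStr n).reverse.map pvDigitInt = if n = 0 then [0] else pvBitsLE n := by
  by_cases h : n = 0
  · simp [pvBinStr, h, pvDigitInt]
  · rw [pvBinStr, if_neg h, if_neg h]
    exact pvBinCore_reverse n

theorem pvZipSum_zero_left (k : Nat) (l : List Int) :
    pvZipSum (List.replicate k 0) l = 0 := by
  induction k generalizing l with
  | zero => simp [pvZipSum]
  | succ k ih =>
    cases l with
    | nil => simp [List.replicate_succ, pvZipSum]
    | cons b bs => simp [List.replicate_succ, pvZipSum, ih]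

theorem pvZipSum_zero_right (l : List Int) (k : Nat) :
    pvZipSum l (List.replicate k 0) = 0 := by
  induction l generalizing k with
  | nil => simp [pvZipSum]
  | cons a as ih =>
    cases k with
    | zero => simp [pvZipSum]
    | succ k => simp [List.replicate_succ, pvZipSum, ih]

-- key invariant: padding with any number of trailing zeros on either side,
-- the zip-sum of the bit lists is the overlap count
theorem pvZipSum_bits (r c p q : Nat) :
    pvZipSum (pvBitsLE r ++ List.replicate p 0) (pvBitsLE c ++ List.replicate q 0)
      = (pvCnt r c : Int) := by
  induction r using Nat.strong_induction_on generalizing c p q with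
  | _ r ih =>
    by_cases hr : r = 0
    · subst hr
      rw [pvBitsLE_zero, List.nil_append, pvZipSum_zero_left, pvCnt_zero_left]
      simp
    · by_cases hc : c = 0
      · subst hc
        rw [pvBitsLE_zero, List.nil_append, pvZipSum_zero_right, pvCnt_zero_right]
        simp
      · rw [pvBitsLE_pos r hr, pvBitsLE_pos c hc, pvCnt]
        rw [if_neg (by simp [hr])]
        simp only [List.cons_append, pvZipSum]
        rw [ih (r / 2) (by omega) (c / 2) p q]
        have h1 : r % 2 = 0 ∨ r % 2 = 1 := by omega
        have h2 : c % 2 = 0 ∨ c % 2 = 1 := by omega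
        rcases h1 with h1 | h1 <;> rcases h2 with h2 | h2 <;> simp [h1, h2]

-- B's recursion computes (-1)^(overlap count); N is inert
theorem pvAltRec_eq_pow_aux (n : Nat) : ∀ r c : Nat, ∀ N : Int,
    r + c ≤ n → pvAltRec r c N = (-1 : Int) ^ pvCnt r c := by
  induction n with
  | zero =>
    intro r c N h
    have hr : r = 0 := by omega
    have hc : c = 0 := by omega
    subst hr; subst hc
    rw [pvAltRec, pvCnt]; simp
  | succ n ih =>
    intro r c N h
    rw [pvAltRec, pvCnt]
    by_cases h0 : r = 0 ∧ c = 0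
    · rw [if_pos h0, if_pos h0]; simp
    · rw [if_neg h0, if_neg h0, ih (r / 2) (c / 2) (N - 1) (by omega)]
      by_cases hb : r % 2 = 1 ∧ c % 2 = 1
      · rw [if_pos hb, if_pos hb, pow_add, pow_one]
      · rw [if_neg hb, if_neg hb, pow_add, pow_zero, one_mul]

theorem pvAltRec_eq_pow (r c : Nat) (N : Int) :
    pvAltRec r c N = (-1 : Int) ^ pvCnt r c :=
  pvAltRec_eq_pow_aux (r + c) r c N le_rfl

-- A's final arithmetic: 2*((1+(-1)^t)/2) - 1 = (-1)^t
theorem pvFinal_step (t : Nat) :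
    2 * ((1 + (-1 : Int) ^ t) / 2) - 1 = (-1 : Int) ^ t := by
  rcases Nat.even_or_odd t with h | h
  · rw [h.neg_one_pow]; norm_num
  · rw [h.neg_one_pow]; norm_num

-- the reversed padded binary string maps to bitsLE followed by zeros
theorem pvToBinary_reverse (n : Int) (N : Int) :
    ∃ k, (to_binary n N).reverse.map pvDigitInt = pvBitsLE n.toNat ++ List.replicate k 0 := by
  unfold to_binary
  rw [List.reverse_append, List.map_append]
  have hz : (List.replicate (N - (pvBinStr n.toNat).length).toNat '0').reverse.map pvDigitInt
      = List.replicate (N - (pvBinStr n.toNat).length).toNat (0 : Int) := by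
    rw [List.reverse_replicate, List.map_replicate]
    simp [pvDigitInt]
  rw [hz, pvBinStr_reverse]
  by_cases h : n.toNat = 0
  · exact ⟨(N - (pvBinStr n.toNat).length).toNat + 1, by
      simp [h, pvBitsLE_zero, List.replicate_succ]⟩
  · exact ⟨(N - (pvBinStr n.toNat).length).toNat, by simp [h]⟩

-- ===== VERDICT (by name: the statement is the Claim_ definition above) =====
theorem get_w_hat_t_helper_spec : Claim_equal_get_w_hat_t_helper := by
  intro r c N _ hpre
  obtain ⟨hr, hc⟩ := hpre
  unfold Spec_get_w_hat_t_helper get_w_hat_t_helper get_w_hat_t_helper_alt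
  rw [if_neg (by omega)]
  obtain ⟨p, hp⟩ := pvToBinary_reverse r N
  obtain ⟨q, hq⟩ := pvToBinary_reverse c N
  simp only [hp, hq, pvZipLoop_eq, pvZipSum_bits, Int.toNat_natCast, pvAltRec_eq_pow]
  exact pvFinal_step _
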